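-- pv_equiv track=rewrite | github.com/Yiseull/programmers-python3 | 월칸 코드 챌린지 시즌3/n^2 배열 자르기.py | solution
-- ===== SOURCE A (Python) =====
-- def solution(n, left, right):
--     arr = []
--
--     for idx in range(left, right + 1):
--         i = idx // n + 1
--         j = idx % n + 1
--
--         if j <= i:
--             arr.append(i)
--         else:
--             arr.append(j)
--
--     return arr
-- ===== SOURCE B (Python) =====
-- def solution(n, left, right):
--     # row-structured emission: walk the rows of the n x n table that intersect
--     # the window and emit each row's constant run [i+1]*... and increasing run
--     # range(...) wholesale, instead of computing max(idx//n, idx%n) per element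
--     out = []
--     i = left // n
--     a = left - i * n                       # start column in the first row
--     while i * n <= right:
--         b = min(n - 1, right - i * n)      # last column of this row inside the window
--         out += [i + 1] * (min(b, i) - a + 1)        # columns a..min(b,i): value i+1
--         out += range(max(a, i + 1) + 1, b + 2)      # columns >i: value j+1
--         i += 1
--         a = 0
--     return out
-- ===== Notes on version B (the rewrite author's own statement) =====
-- stated objective: alternative
-- what changed: B walks the rows of the n-by-n table intersecting the window and emits each row as two wholesale runs (a replicated constant block and a range object) instead of A's per-index loop computing idx//n and idx%n for every element.
-- outside the precondition, e.g. on solution(-2, 0, 2): A returns [1, 0, 1], B does not finish within the time limit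
import Mathlib
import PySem

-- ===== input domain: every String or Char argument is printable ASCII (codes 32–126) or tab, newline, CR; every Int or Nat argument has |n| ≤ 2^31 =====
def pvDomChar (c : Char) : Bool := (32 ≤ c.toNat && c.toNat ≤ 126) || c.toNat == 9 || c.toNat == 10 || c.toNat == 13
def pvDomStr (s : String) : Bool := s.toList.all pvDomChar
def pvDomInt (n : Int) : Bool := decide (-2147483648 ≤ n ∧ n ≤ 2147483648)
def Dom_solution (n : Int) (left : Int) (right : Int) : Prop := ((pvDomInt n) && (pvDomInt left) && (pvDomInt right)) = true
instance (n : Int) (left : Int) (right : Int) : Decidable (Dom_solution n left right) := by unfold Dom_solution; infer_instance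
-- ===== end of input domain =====

-- B walks the rows of the n×n table intersecting the window and emits each row as two
-- wholesale runs (constant block + increasing range) instead of A's per-index divmod loop
-- (alternative decomposition, same asymptotic cost).

-- ===== PORT A =====
def solution (n : Int) (left : Int) (right : Int) : List Int :=
  (PySem.List.pyRange left (right + 1) 1).foldl (fun arr idx =>
    let i := PySem.Int.floordiv idx n + 1
    let j := PySem.Int.mod idx n + 1
    if j ≤ i then arr ++ [i] else arr ++ [j]) []

-- ===== PORT B =====
-- B's while loop; the Nat fuel is exactly the number of iterations and only makes the
-- recursion total (the loop diverges for n < 0 with a non-empty window, outside Pre_).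
def solutionAltLoop (n right : Int) (k : Nat) (i a : Int) (out : List Int) : List Int :=
  match k with
  | 0 => out
  | k + 1 =>
    if i * n ≤ right then
      let b := min (n - 1) (right - i * n)
      solutionAltLoop n right k (i + 1) 0
        (out ++ List.replicate (min b i - a + 1).toNat (i + 1)
             ++ PySem.List.pyRange (max a (i + 1) + 1) (b + 2) 1)
    else out

def solution_alt (n : Int) (left : Int) (right : Int) : List Int :=
  let i := PySem.Int.floordiv left n
  solutionAltLoop n right (PySem.Int.floordiv right n - i + 1).toNat i (left - i * n) []

-- ===== PRECONDITION & SPEC =====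
-- Pre_ admits the puzzle's natural domain n ≥ 1 (plus the trivial empty window, on which n's
-- sign is irrelevant): for n = 0 A raises ZeroDivisionError, and for n < 0 with a non-empty
-- window A's values are artifacts of Python's divisor-signed floor division that B's
-- row-walking loop (which presupposes a positive row width) does not terminate on.
def Pre_solution (n : Int) (left : Int) (right : Int) : Prop := 1 ≤ n ∨ (n ≠ 0 ∧ right + 1 ≤ left)
instance (n : Int) (left : Int) (right : Int) : Decidable (Pre_solution n left right) := by unfold Pre_solution; infer_instance
def pvWitness_solution : Int × Int × Int := (3, 2, 5)
def Spec_solution (n : Int) (left : Int) (right : Int) (out : List Int) : Prop := out = solution_alt n left right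
instance (n : Int) (left : Int) (right : Int) (out : List Int) : Decidable (Spec_solution n left right out) := by unfold Spec_solution; infer_instance

-- ===== CLAIM (what is proved, stated in full; the proofs are below) =====
def Claim_equal_solution : Prop := ∀ (n : Int) (left : Int) (right : Int), Dom_solution n left right → Pre_solution n left right → Spec_solution n left right (solution n left right)

-- ===== LEMMAS AND PROOFS =====

-- the per-index value A appends
def pvCell (n idx : Int) : Int :=
  if PySem.Int.mod idx n + 1 ≤ PySem.Int.floordiv idx n + 1
  then PySem.Int.floordiv idx n + 1 else PySem.Int.mod idx n + 1

theorem pv_foldl_cells (n : Int) (L : List Int) (acc : List Int) :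
    L.foldl (fun arr idx =>
      let i := PySem.Int.floordiv idx n + 1
      let j := PySem.Int.mod idx n + 1
      if j ≤ i then arr ++ [i] else arr ++ [j]) acc = acc ++ L.map (pvCell n) := by
  induction L generalizing acc with
  | nil => simp
  | cons x xs ih =>
    simp only [List.foldl_cons, List.map_cons]
    split_ifs with h <;> rw [ih] <;> simp [pvCell, h]

theorem pv_cell_formula (n i j : Int) (hn : 1 ≤ n) (h0 : 0 ≤ j) (hj : j < n) :
    pvCell n (i * n + j) = if j ≤ i then i + 1 else j + 1 := by
  have e1 := PySem.Int.floordiv_eq_ediv_of_pos (a := i * n + j) (by omega : (0:Int) < n)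
  have e2 := PySem.Int.mod_eq_emod_of_pos (a := i * n + j) (by omega : (0:Int) < n)
  have hd : (i * n + j) / n = i := by
    rw [add_comm, Int.add_mul_ediv_right _ _ (by omega : n ≠ 0),
      Int.ediv_eq_zero_of_lt h0 hj, zero_add]
  have hm : (i * n + j) % n = j := by
    rw [add_comm, mul_comm, Int.add_mul_emod_self_left, Int.emod_eq_of_lt h0 hj]
  unfold pvCell
  rw [e1, e2, hd, hm]
  split_ifs <;> omega

-- one row of the table, columns a..b, mapped through pvCell, equals B's two runs
theorem pv_row_eq (n i b : Int) (hn : 1 ≤ n) (hb : b ≤ n - 1) :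
    ∀ (k : Nat) (a : Int), 0 ≤ a → k = (b + 1 - a).toNat →
    (PySem.List.pyRange (i * n + a) (i * n + b + 1) 1).map (pvCell n)
      = List.replicate (min b i - a + 1).toNat (i + 1)
        ++ PySem.List.pyRange (max a (i + 1) + 1) (b + 2) 1 := by
  intro k
  induction k with
  | zero =>
    intro a h0 hk
    have ha : b + 1 ≤ a := by omega
    rw [PySem.List.pyRange_one_eq_nil (by omega),
      PySem.List.pyRange_one_eq_nil (by omega : b + 2 ≤ max a (i + 1) + 1)]
    have : (min b i - a + 1).toNat = 0 := by omega
    rw [this]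
    simp
  | succ k ih =>
    intro a h0 hk
    have hab : a ≤ b := by omega
    have hcons : PySem.List.pyRange (i * n + a) (i * n + b + 1) 1
        = (i * n + a) :: PySem.List.pyRange (i * n + a + 1) (i * n + b + 1) 1 :=
      PySem.List.pyRange_one_cons (by omega)
    have hnext : i * n + a + 1 = i * n + (a + 1) := by ring
    rw [hcons, List.map_cons, pv_cell_formula n i a hn h0 (by omega), hnext,
      ih (a + 1) (by omega) (by omega)]
    by_cases hai : a ≤ i
    · have hrep : (min b i - a + 1).toNat = ((min b i - (a + 1) + 1).toNat) + 1 := by omega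
      have hmax : max a (i + 1) = max (a + 1) (i + 1) := by omega
      rw [if_pos hai, hrep, List.replicate_succ, hmax]
      simp
    · have hz : (min b i - a + 1).toNat = 0 := by omega
      have hz' : (min b i - (a + 1) + 1).toNat = 0 := by omega
      have hm1 : max a (i + 1) = a := by omega
      have hm2 : max (a + 1) (i + 1) = a + 1 := by omega
      rw [if_neg hai, hz, hz', hm1, hm2]
      have : PySem.List.pyRange (a + 1) (b + 2) 1
          = (a + 1) :: PySem.List.pyRange (a + 1 + 1) (b + 2) 1 :=
        PySem.List.pyRange_one_cons (by omega)
      rw [this]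
      simp

theorem pv_loop_eq (n right : Int) (hn : 1 ≤ n) :
    ∀ (k : Nat) (i a : Int) (out : List Int), 0 ≤ a → a ≤ n →
      k = (PySem.Int.floordiv right n - i + 1).toNat →
      solutionAltLoop n right k i a out
        = out ++ (PySem.List.pyRange (i * n + a) (right + 1) 1).map (pvCell n) := by
  have hfr := PySem.Int.floordiv_eq_ediv_of_pos (a := right) (by omega : (0:Int) < n)
  have hdm := Int.mul_ediv_add_emod right n
  have hm0 := Int.emod_nonneg right (by omega : n ≠ 0)
  have hm1 := Int.emod_lt_of_pos right (by omega : (0:Int) < n)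
  intro k
  induction k with
  | zero =>
    intro i a out h0 han hk
    have : ¬ (i ≤ right / n) := by omega
    have hbig : right < i * n + a := by nlinarith [this]
    rw [PySem.List.pyRange_one_eq_nil (by omega)]
    simp [solutionAltLoop]
  | succ k ih =>
    intro i a out h0 han hk
    simp only [solutionAltLoop]
    split_ifs with hc
    · have hile : i ≤ right / n := by
        by_contra h
        have : right / n + 1 ≤ i := by omega
        nlinarith
      set b := min (n - 1) (right - i * n) with hbdef
      have hb0 : 0 ≤ b := by omega
      have hbn : b ≤ n - 1 := by omega
      have hsplit : PySem.List.pyRange (i * n + a) (right + 1) 1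
          = PySem.List.pyRange (i * n + a) (i * n + b + 1) 1
            ++ PySem.List.pyRange ((i + 1) * n) (right + 1) 1 := by
        by_cases hab : a ≤ b + 1
        · rw [PySem.List.pyRange_one_append (i * n + a) (i * n + b + 1) (right + 1)
            (by omega) (by omega)]
          congr 1
          by_cases hfull : b = n - 1
          · congr 1; rw [hfull]; ring
          · have hbr : b = right - i * n := by omega
            rw [PySem.List.pyRange_one_eq_nil (by omega),
              PySem.List.pyRange_one_eq_nil (by nlinarith)]
        · have hbr : b = right - i * n := by omega
          rw [PySem.List.pyRange_one_eq_nil (by omega),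
            PySem.List.pyRange_one_eq_nil (by omega),
            PySem.List.pyRange_one_eq_nil (by nlinarith)]
          simp
      rw [ih (i + 1) 0 _ le_rfl (by omega) (by omega), hsplit, List.map_append,
        pv_row_eq n i b hn hbn (b + 1 - a).toNat a h0 rfl]
      have : (i + 1) * n + 0 = (i + 1) * n := by ring
      rw [this]
      simp
    · have hbig : right < i * n + a := by omega
      rw [PySem.List.pyRange_one_eq_nil (by omega)]
      simp

-- ===== VERDICT (by name: the statement is the Claim_ definition above) =====
theorem solution_spec : Claim_equal_solution := by
  intro n left right _ hpre
  unfold Spec_solution solution solution_alt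
  rw [pv_foldl_cells]
  by_cases hn : 1 ≤ n
  · have hfl := PySem.Int.floordiv_mul_add_mod left n
    have hm0 := PySem.Int.mod_nonneg (a := left) (by omega : (0:Int) < n)
    have hm1 := PySem.Int.mod_lt (a := left) (by omega : (0:Int) < n)
    rw [pv_loop_eq n right hn _ _ _ _ (by omega) (by omega) rfl]
    have : PySem.Int.floordiv left n * n + (left - PySem.Int.floordiv left n * n) = left := by
      ring
    rw [this]
  · rcases hpre with hpre | ⟨hne, hempty⟩
    · omega
    · have hneg : n < 0 := by omega
      have hmb := PySem.Int.mod_neg_bounds (a := left) hneg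
      have hfl := PySem.Int.floordiv_mul_add_mod left n
      have hcond : ¬ (PySem.Int.floordiv left n * n ≤ right) := by omega
      rw [PySem.List.pyRange_one_eq_nil (by omega)]
      show ([] : List Int) ++ List.map (pvCell n) [] =
        solutionAltLoop n right
          (PySem.Int.floordiv right n - PySem.Int.floordiv left n + 1).toNat
          (PySem.Int.floordiv left n) (left - PySem.Int.floordiv left n * n) []
      cases hfuel : (PySem.Int.floordiv right n - PySem.Int.floordiv left n + 1).toNat with
      | zero => rfl
      | succ k => simp only [solutionAltLoop, if_neg hcond]; rfl
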